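-- pv_equiv track=rewrite | github.com/cathyxl/covid_lock_map | web/deal_with_crawled_data.py | predict_lock_for_region
-- ===== SOURCE A (Python) =====
-- def predict_lock_for_region(lock_list, last_time_lock):
--     """
--     Combine all lock prediction results to get the final result
--     Here we just choose the lock class with the maximum amount,
--     and making the lock condition continuable according to time series if no new condition happens
--     :param lock_list:[weibo_id, lock, score]
--     :return: lock class, relative weibo file ids
--     """
--
--     lock_count = {1: 0, 2: 0, 3: 0}
--     flag = 0
--     for lock in lock_list:
--         if lock[1]:
--             flag = 1
--             lock_count[lock[1]] += 1
--     if flag == 0:  # cannot predict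
--         pred_lock = 0
--     else:
--         pred_lock = sorted(lock_count.items(), key=lambda k: k[1])[-1][0]
--
--     rel_ids = []
--     for lock in lock_list:
--         if lock[1] == pred_lock:
--             rel_ids.append(lock[0])
--     "Refine lock prediction according to the time series," \
--     "if current lock is unk but last lock is not, then continuing the lock condition"
--     if pred_lock == 0:
--         if last_time_lock != 0:
--             pred_lock = last_time_lock
--
--     return pred_lock, rel_ids
-- ===== SOURCE B (Python) =====
-- def predict_lock_for_region(lock_list, last_time_lock):
--     """One pass: group weibo ids by lock class while scanning, then pick the
--     largest group (ties to the largest class, as sorted(...)[-1] does)."""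
--     g1, g2, g3, zeros = [], [], [], []
--     found = False
--     for entry in lock_list:
--         c = entry[1]
--         if c == 1:
--             g1.append(entry[0]); found = True
--         elif c == 2:
--             g2.append(entry[0]); found = True
--         elif c == 3:
--             g3.append(entry[0]); found = True
--         else:
--             zeros.append(entry[0])
--     if not found:
--         return (last_time_lock if last_time_lock != 0 else 0), zeros
--     pred, ids = 1, g1
--     if len(g2) >= len(ids):
--         pred, ids = 2, g2
--     if len(g3) >= len(ids):
--         pred, ids = 3, g3
--     return pred, ids
-- ===== Notes on version B (the rewrite author's own statement) =====
-- stated objective: simpler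
-- what changed: B groups the weibo ids by lock class in a single pass (four accumulating lists plus a found flag) and picks the largest group with a constant tie-to-largest-class chain, replacing A's count dict + sort of the counts + a second full scan to collect the ids.
import Mathlib
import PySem

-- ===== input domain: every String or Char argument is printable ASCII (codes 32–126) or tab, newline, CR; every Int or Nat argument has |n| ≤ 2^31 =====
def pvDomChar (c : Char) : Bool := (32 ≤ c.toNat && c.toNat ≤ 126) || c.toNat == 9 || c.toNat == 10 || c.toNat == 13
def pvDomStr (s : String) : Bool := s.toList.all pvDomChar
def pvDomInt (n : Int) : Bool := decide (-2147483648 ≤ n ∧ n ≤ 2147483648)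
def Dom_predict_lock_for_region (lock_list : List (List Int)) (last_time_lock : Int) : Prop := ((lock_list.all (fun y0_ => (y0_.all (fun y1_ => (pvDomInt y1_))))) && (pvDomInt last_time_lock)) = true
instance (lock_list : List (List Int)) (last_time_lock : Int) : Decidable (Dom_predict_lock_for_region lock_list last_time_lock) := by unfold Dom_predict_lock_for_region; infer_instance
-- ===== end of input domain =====

-- B groups ids by lock class in ONE pass and picks the largest group with a constant
-- tie-break chain, instead of A's count dict + sort of counts + second full scan.


-- ===== PORT A =====
def predict_lock_for_region (lock_list : List (List Int)) (last_time_lock : Int) : Int × List Int :=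
  -- lock_count = {1:0, 2:0, 3:0}; flag = 0; for lock in lock_list: if lock[1]: flag = 1; lock_count[lock[1]] += 1
  let d0 : PySem.Dict Int Int := ((PySem.Dict.empty.insert 1 0).insert 2 0).insert 3 0
  let st := lock_list.foldl (fun (st : PySem.Dict Int Int × Int) lock =>
      let c := PySem.List.pyGetD lock 1 0
      if c ≠ 0 then (st.1.modify c 0 (· + 1), 1) else st) (d0, 0)
  -- pred_lock = 0 if flag == 0 else sorted(lock_count.items(), key=lambda k: k[1])[-1][0]
  let pred : Int :=
    if st.2 = 0 then 0
    else ((PySem.List.pyGet? (PySem.List.sorted st.1.items (fun k => k.2) false) (-1)).getD (0, 0)).1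
  -- rel_ids = [lock[0] for lock in lock_list if lock[1] == pred_lock]
  let rel_ids := lock_list.foldl (fun acc lock =>
      if PySem.List.pyGetD lock 1 0 = pred then acc ++ [PySem.List.pyGetD lock 0 0] else acc) []
  -- if pred_lock == 0 and last_time_lock != 0: pred_lock = last_time_lock
  let pred := if pred = 0 then (if last_time_lock ≠ 0 then last_time_lock else pred) else pred
  (pred, rel_ids)

-- ===== PORT B =====
def predict_lock_for_region_alt (lock_list : List (List Int)) (last_time_lock : Int) : Int × List Int :=
  -- one pass: g1, g2, g3, zeros, found
  let st := lock_list.foldl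
    (fun (st : List Int × List Int × List Int × List Int × Bool) entry =>
      let c := PySem.List.pyGetD entry 1 0
      let v := PySem.List.pyGetD entry 0 0
      if c = 1 then (st.1 ++ [v], st.2.1, st.2.2.1, st.2.2.2.1, true)
      else if c = 2 then (st.1, st.2.1 ++ [v], st.2.2.1, st.2.2.2.1, true)
      else if c = 3 then (st.1, st.2.1, st.2.2.1 ++ [v], st.2.2.2.1, true)
      else (st.1, st.2.1, st.2.2.1, st.2.2.2.1 ++ [v], st.2.2.2.2))
    ([], [], [], [], false)
  match st with
  | (g1, g2, g3, zeros, found) =>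
    if !found then ((if last_time_lock ≠ 0 then last_time_lock else 0), zeros)
    else
      let pi : Int × List Int := (1, g1)
      let pi := if g2.length ≥ pi.2.length then ((2 : Int), g2) else pi
      let pi := if g3.length ≥ pi.2.length then ((3 : Int), g3) else pi
      pi

-- ===== PRECONDITION & SPEC =====
-- Pre_ excludes exactly the inputs where the Python A raises: an entry shorter than 2
-- (IndexError on lock[1]) or a lock class outside {0,1,2,3} (KeyError on lock_count[lock[1]]).
def Pre_predict_lock_for_region (lock_list : List (List Int)) (last_time_lock : Int) : Prop :=
  ∀ l ∈ lock_list, 2 ≤ l.length ∧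
    (PySem.List.pyGetD l 1 0 = 0 ∨ PySem.List.pyGetD l 1 0 = 1 ∨
     PySem.List.pyGetD l 1 0 = 2 ∨ PySem.List.pyGetD l 1 0 = 3)
instance (lock_list : List (List Int)) (last_time_lock : Int) : Decidable (Pre_predict_lock_for_region lock_list last_time_lock) := by unfold Pre_predict_lock_for_region; infer_instance
def pvWitness_predict_lock_for_region : List (List Int) × Int := ([[10, 1], [11, 0], [12, 1], [13, 2]], 2)

def Spec_predict_lock_for_region (lock_list : List (List Int)) (last_time_lock : Int) (out : Int × List Int) : Prop := out = predict_lock_for_region_alt lock_list last_time_lock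
instance (lock_list : List (List Int)) (last_time_lock : Int) (out : Int × List Int) : Decidable (Spec_predict_lock_for_region lock_list last_time_lock out) := by unfold Spec_predict_lock_for_region; infer_instance

-- ===== CLAIM (what is proved, stated in full; the proofs are below) =====
def Claim_equal_predict_lock_for_region : Prop := ∀ (lock_list : List (List Int)) (last_time_lock : Int), Dom_predict_lock_for_region lock_list last_time_lock → Pre_predict_lock_for_region lock_list last_time_lock → Spec_predict_lock_for_region lock_list last_time_lock (predict_lock_for_region lock_list last_time_lock)
-- ===== LEMMAS AND PROOFS =====

-- the lock class and the weibo id of an entry, as both ports read them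
def pvK (l : List Int) : Int := PySem.List.pyGetD l 1 0
def pvF (l : List Int) : Int := PySem.List.pyGetD l 0 0

lemma A_loop (ll : List (List Int))
    (h : ∀ l ∈ ll, pvK l = 0 ∨ pvK l = 1 ∨ pvK l = 2 ∨ pvK l = 3) :
    ∀ (a b c fl : Int),
    ll.foldl (fun (st : PySem.Dict Int Int × Int) lock =>
        let k := PySem.List.pyGetD lock 1 0
        if k ≠ 0 then (st.1.modify k 0 (· + 1), 1) else st)
      (PySem.Dict.mk [(1, a), (2, b), (3, c)], fl)
    = (PySem.Dict.mk [(1, a + (ll.countP (fun l => pvK l = 1) : Int)),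
                      (2, b + (ll.countP (fun l => pvK l = 2) : Int)),
                      (3, c + (ll.countP (fun l => pvK l = 3) : Int))],
       if ll.any (fun l => pvK l ≠ 0) then 1 else fl) := by
  induction ll with
  | nil => intro a b c fl; simp
  | cons hd tl ih =>
    intro a b c fl
    have htl : ∀ l ∈ tl, pvK l = 0 ∨ pvK l = 1 ∨ pvK l = 2 ∨ pvK l = 3 :=
      fun l hl => h l (List.mem_cons_of_mem _ hl)
    rw [List.foldl_cons]
    rcases h hd (List.mem_cons_self) with h0 | h0 | h0 | h0 <;> unfold pvK at h0
    · simp only [h0]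
      rw [if_neg (by norm_num), ih htl]
      simp [pvK, h0]
    · simp only [h0]
      rw [if_pos (by norm_num),
        show ((PySem.Dict.mk [((1:Int),a),(2,b),(3,c)], fl).1.modify 1 0 fun x => x + 1)
          = PySem.Dict.mk [(1,a+1),(2,b),(3,c)] from rfl, ih htl]
      simp [pvK, h0]
      ring
    · simp only [h0]
      rw [if_pos (by norm_num),
        show ((PySem.Dict.mk [((1:Int),a),(2,b),(3,c)], fl).1.modify 2 0 fun x => x + 1)
          = PySem.Dict.mk [(1,a),(2,b+1),(3,c)] from rfl, ih htl]
      simp [pvK, h0]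
      ring
    · simp only [h0]
      rw [if_pos (by norm_num),
        show ((PySem.Dict.mk [((1:Int),a),(2,b),(3,c)], fl).1.modify 3 0 fun x => x + 1)
          = PySem.Dict.mk [(1,a),(2,b),(3,c+1)] from rfl, ih htl]
      simp [pvK, h0]
      ring

lemma B_loop (ll : List (List Int)) :
    ∀ (g1 g2 g3 z : List Int) (fd : Bool),
    ll.foldl
      (fun (st : List Int × List Int × List Int × List Int × Bool) entry =>
        let c := PySem.List.pyGetD entry 1 0
        let v := PySem.List.pyGetD entry 0 0
        if c = 1 then (st.1 ++ [v], st.2.1, st.2.2.1, st.2.2.2.1, true)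
        else if c = 2 then (st.1, st.2.1 ++ [v], st.2.2.1, st.2.2.2.1, true)
        else if c = 3 then (st.1, st.2.1, st.2.2.1 ++ [v], st.2.2.2.1, true)
        else (st.1, st.2.1, st.2.2.1, st.2.2.2.1 ++ [v], st.2.2.2.2))
      (g1, g2, g3, z, fd)
    = (g1 ++ (ll.filter (fun l => pvK l = 1)).map pvF,
       g2 ++ (ll.filter (fun l => pvK l = 2)).map pvF,
       g3 ++ (ll.filter (fun l => pvK l = 3)).map pvF,
       z ++ (ll.filter (fun l => ¬(pvK l = 1 ∨ pvK l = 2 ∨ pvK l = 3))).map pvF,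
       fd || ll.any (fun l => pvK l = 1 ∨ pvK l = 2 ∨ pvK l = 3)) := by
  induction ll with
  | nil => intro g1 g2 g3 z fd; simp
  | cons hd tl ih =>
    intro g1 g2 g3 z fd
    rw [List.foldl_cons]
    by_cases h1 : PySem.List.pyGetD hd 1 0 = 1
    · simp only [h1]
      rw [if_pos trivial, ih]
      simp [pvK, pvF, h1, List.any_cons]
    · by_cases h2 : PySem.List.pyGetD hd 1 0 = 2
      · simp only [h2]
        rw [if_neg (by norm_num), if_pos trivial, ih]
        simp [pvK, pvF, h2, List.any_cons]
      · by_cases h3 : PySem.List.pyGetD hd 1 0 = 3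
        · simp only [h3]
          rw [if_neg (by norm_num), if_neg (by norm_num), if_pos trivial, ih]
          simp [pvK, pvF, h3, List.any_cons]
        · rw [if_neg (by simpa using h1), if_neg (by simpa using h2),
            if_neg (by simpa using h3), ih]
          simp [pvK, pvF, h1, h2, h3, List.any_cons]

lemma sortedLast3 (a b c : Int) :
    ((PySem.List.pyGet? (PySem.List.sorted [((1 : Int), a), (2, b), (3, c)] (fun k => k.2) false) (-1)).getD (0, 0)).1
    = if c ≥ a ∧ c ≥ b then 3 else if b ≥ a then 2 else 1 := by
  by_cases h1 : b < a <;> by_cases h2 : c < a <;> by_cases h3 : c < b <;>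
    simp [PySem.List.sorted_eq_foldl_insertBy, PySem.List.insertBy, h1, h2, h3,
      PySem.List.pyGet?, PySem.List.pyIdx?] <;>
    split_ifs <;> first | rfl | omega

-- ===== VERDICT (by name: the statement is the Claim_ definition above) =====
theorem predict_lock_for_region_spec : Claim_equal_predict_lock_for_region := by
  intro ll lt _hdom hpre
  unfold Spec_predict_lock_for_region
  have hK : ∀ l ∈ ll, pvK l = 0 ∨ pvK l = 1 ∨ pvK l = 2 ∨ pvK l = 3 :=
    fun l hl => (hpre l hl).2
  simp only [predict_lock_for_region, predict_lock_for_region_alt]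
  rw [show (((PySem.Dict.empty.insert (1:Int) (0:Int)).insert 2 0).insert 3 0)
      = PySem.Dict.mk [(1,0),(2,0),(3,0)] from rfl]
  rw [A_loop ll hK 0 0 0 0, B_loop ll [] [] [] [] false]
  have hcls : (ll.any (fun l => pvK l = 1 ∨ pvK l = 2 ∨ pvK l = 3))
      = ll.any (fun l => pvK l ≠ 0) := by
    apply PySem.List.any_congr_mem
    intro l hl
    rcases hK l hl with h0 | h0 | h0 | h0 <;> simp [h0]
  have hz : ll.filter (fun l => ¬(pvK l = 1 ∨ pvK l = 2 ∨ pvK l = 3))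
      = ll.filter (fun l => pvK l = 0) := by
    apply List.filter_congr
    intro l hl
    rcases hK l hl with h0 | h0 | h0 | h0 <;> simp [h0]
  simp only [hcls, hz, Bool.false_or, zero_add]
  by_cases hany : ll.any (fun l => pvK l ≠ 0) = true
  · -- some lock class was seen: flag = 1, found = true
    simp only [hany, if_true, Bool.not_true, Bool.false_eq_true, if_false]
    rw [if_neg (by norm_num : ¬((1:Int) = 0))]
    rw [sortedLast3]
    rw [PySem.List.foldl_append_ite (p := fun lock => PySem.List.pyGetD lock 1 0 =
      (if ((ll.countP (fun l => pvK l = 3)) : Int) ≥ ((ll.countP (fun l => pvK l = 1)) : Int) ∧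
          ((ll.countP (fun l => pvK l = 3)) : Int) ≥ ((ll.countP (fun l => pvK l = 2)) : Int)
        then 3 else if ((ll.countP (fun l => pvK l = 2)) : Int) ≥ ((ll.countP (fun l => pvK l = 1)) : Int) then 2 else 1))]
    have hl1 : ((ll.filter (fun l => pvK l = 1)).map pvF).length = ll.countP (fun l => pvK l = 1) := by
      simp [List.countP_eq_length_filter]
    have hl2 : ((ll.filter (fun l => pvK l = 2)).map pvF).length = ll.countP (fun l => pvK l = 2) := by
      simp [List.countP_eq_length_filter]
    have hl3 : ((ll.filter (fun l => pvK l = 3)).map pvF).length = ll.countP (fun l => pvK l = 3) := by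
      simp [List.countP_eq_length_filter]
    simp only [List.nil_append]
    split_ifs with hA hB1 hB2 hB3 hB4 hB5 hB6 <;>
      first
        | rfl
        | (exfalso; simp only [List.length_map, hl1, hl2, hl3] at *; omega)
  · -- no lock was seen: flag = 0, found = false
    rw [Bool.not_eq_true] at hany
    simp only [hany, Bool.false_eq_true, if_false, Bool.not_false, if_true]
    norm_num
    rw [PySem.List.foldl_append_ite (p := fun lock => PySem.List.pyGetD lock 1 0 = 0)]
    simp only [List.nil_append, pvK]
    exact rfl
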